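-- pv_equiv track=rewrite | github.com/strikersps/Competitive-Programming | Code-Chef/Compiler-and-Parsers/compiler_and_parsers.py | compute_length_of_prefix
-- ===== SOURCE A (Python) =====
-- def compute_length_of_prefix(expression):
--     length_of_longest_prefix = 0
--     open_count = 0
--     for index, e in enumerate(expression):
--         if e == '<':
--             open_count += 1
--         else:
--             open_count -= 1
--         if open_count < 0:
--             break
--         if not open_count:
--             length_of_longest_prefix = index + 1
--     return length_of_longest_prefix
-- ===== SOURCE B (Python) =====
-- def compute_length_of_prefix(expression):
--     # Materialize the prefix-balance table, find the cutoff at the first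
--     # negative balance, then scan backwards for the last balanced position.
--     balances = []
--     b = 0
--     for c in expression:
--         b += 1 if c == '<' else -1
--         balances.append(b)
--     cutoff = len(balances)
--     for i, v in enumerate(balances):
--         if v < 0:
--             cutoff = i
--             break
--     for i in range(cutoff - 1, -1, -1):
--         if balances[i] == 0:
--             return i + 1
--     return 0
-- ===== Notes on version B (the rewrite author's own statement) =====
-- stated objective: alternative
-- what changed: Replaces A's single fused forward loop carrying (open_count, answer) state with three separate passes: materialize the full prefix-balance table, locate the cutoff at the first negative entry, then scan the truncated table backwards for the last zero balance.
import Mathlib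
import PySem

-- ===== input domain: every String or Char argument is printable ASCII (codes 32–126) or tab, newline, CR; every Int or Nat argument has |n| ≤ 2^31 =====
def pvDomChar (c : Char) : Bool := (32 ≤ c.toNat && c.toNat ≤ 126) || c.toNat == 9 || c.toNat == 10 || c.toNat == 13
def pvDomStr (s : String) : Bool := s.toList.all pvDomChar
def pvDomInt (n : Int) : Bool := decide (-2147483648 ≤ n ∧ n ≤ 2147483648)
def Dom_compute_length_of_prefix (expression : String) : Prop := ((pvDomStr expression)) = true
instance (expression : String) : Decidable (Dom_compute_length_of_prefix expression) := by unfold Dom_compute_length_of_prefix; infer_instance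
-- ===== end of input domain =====

-- B replaces A's fused forward loop by three passes over a materialized prefix-balance
-- table (build table, find first-negative cutoff, scan backwards for the last zero).

-- ===== PORT A =====
-- A's single loop: state (index, open_count, length_of_longest_prefix), break on negative.
def pvLoopA : List Char → Int → Int → Int → Int
  | [], _, _, ans => ans
  | c :: rest, idx, openCount, ans =>
    let openCount' := if c = '<' then openCount + 1 else openCount - 1
    if openCount' < 0 then ans
    else pvLoopA rest (idx + 1) openCount' (if openCount' = 0 then idx + 1 else ans)

def compute_length_of_prefix (expression : String) : Int :=
  pvLoopA expression.toList 0 0 0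

-- ===== PORT B =====
-- pass 1: the prefix-balance table
def pvBalances : List Char → Int → List Int
  | [], _ => []
  | c :: rest, b =>
    let b' := b + (if c = '<' then 1 else -1)
    b' :: pvBalances rest b'

-- pass 2: index of the first negative entry (table length if none)
def pvCutoff : List Int → Nat
  | [] => 0
  | v :: rest => if v < 0 then 0 else pvCutoff rest + 1

-- pass 3: backwards scan of the truncated table for the last zero (its index, if any)
def pvLastZero : List Int → Option Int
  | [] => none
  | v :: rest =>
    match pvLastZero rest with
    | some j => some (j + 1)
    | none => if v = 0 then some 0 else none

def compute_length_of_prefix_alt (expression : String) : Int :=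
  let balances := pvBalances expression.toList 0
  let cutoff := pvCutoff balances
  match pvLastZero (balances.take cutoff) with
  | some i => i + 1
  | none => 0

-- ===== PRECONDITION & SPEC =====
def Spec_compute_length_of_prefix (expression : String) (out : Int) : Prop := out = compute_length_of_prefix_alt expression
instance (expression : String) (out : Int) : Decidable (Spec_compute_length_of_prefix expression out) := by unfold Spec_compute_length_of_prefix; infer_instance

-- ===== CLAIM (what is proved, stated in full; the proofs are below) =====
def Claim_equal_compute_length_of_prefix : Prop := ∀ (expression : String), Dom_compute_length_of_prefix expression → Spec_compute_length_of_prefix expression (compute_length_of_prefix expression)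

-- ===== LEMMAS AND PROOFS =====

-- A's loop viewed on the prefix-sum list
def pvG : List Int → Int → Int → Int
  | [], _, ans => ans
  | v :: rest, idx, ans =>
    if v < 0 then ans else pvG rest (idx + 1) (if v = 0 then idx + 1 else ans)

theorem pvLoopA_eq_pvG (cs : List Char) : ∀ (idx o ans : Int),
    pvLoopA cs idx o ans = pvG (pvBalances cs o) idx ans := by
  induction cs with
  | nil => intro idx o ans; rfl
  | cons c rest ih =>
    intro idx o ans
    simp only [pvLoopA, pvBalances, pvG]
    have h : (if c = '<' then o + 1 else o - 1) = o + (if c = '<' then 1 else -1) := by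
      split <;> ring
    rw [h]
    rcases lt_or_ge (o + (if c = '<' then (1:Int) else -1)) 0 with hb | hb
    · rw [if_pos hb, if_pos hb]
    · rw [if_neg (not_lt.2 hb), if_neg (not_lt.2 hb)]; exact ih _ _ _

theorem pvG_eq_twopass (t : List Int) : ∀ (idx ans : Int),
    pvG t idx ans =
      match pvLastZero (t.take (pvCutoff t)) with
      | some j => idx + j + 1
      | none => ans := by
  induction t with
  | nil => intro idx ans; rfl
  | cons v rest ih =>
    intro idx ans
    simp only [pvG, pvCutoff]
    by_cases hv : v < 0
    · simp [hv, pvLastZero]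
    · simp only [hv, if_false]
      rw [ih]
      simp only [List.take_succ_cons, pvLastZero]
      cases hz : pvLastZero (rest.take (pvCutoff rest)) with
      | some j => simp; omega
      | none =>
        by_cases h0 : v = 0
        · simp [h0]
        · simp [h0]

-- ===== VERDICT (by name: the statement is the Claim_ definition above) =====
theorem compute_length_of_prefix_spec : Claim_equal_compute_length_of_prefix := by
  intro expression _
  show compute_length_of_prefix expression = compute_length_of_prefix_alt expression
  unfold compute_length_of_prefix compute_length_of_prefix_alt
  rw [pvLoopA_eq_pvG, pvG_eq_twopass]
  cases hz : pvLastZero ((pvBalances expression.toList 0).take (pvCutoff (pvBalances expression.toList 0))) with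
  | some j => simp [hz]
  | none => simp [hz]
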